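-- pv_equiv track=rewrite | github.com/kelvinhekelvin12399/AIsubTranslate | subTranslate.py | create_bilingual_subtitles
-- ===== SOURCE A (Python) =====
-- def get_processed_subtitles(text, batch_size):
--     subtitle_blocks = text.split('\n\n')
--     all_processed_texts = []
--     for batch_start in range(0, len(subtitle_blocks), batch_size):
--         batch_blocks = subtitle_blocks[batch_start:batch_start + batch_size]
--         processed_batch = []
--         for block in batch_blocks:
--             lines = block.split('\n')
--             subtitle_text = ' '.join(lines[2:])  # 合并每个字幕块的文本为一行
--             processed_batch.append(subtitle_text.strip())
--         processed_text_for_batch = '\n'.join(processed_batch)  # 使用句尾符将不同块的文本分隔开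
--         all_processed_texts.append(processed_text_for_batch)  # 将整个批次的处理后文本添加到列表中
--
--     # 将所有批次的处理后文本以单个句尾符连接成一个字符串，并返回
--     final_processed_text = '\n'.join(all_processed_texts)
--     return final_processed_text
--
-- def create_chinese_subtitles(original_text, translated_text):
--     # 分割原始字幕和翻译后的文本为单独的块和行
--     original_blocks = original_text.split('\n\n')
--     translated_lines = translated_text.split('\n')
--
--     chinese_subtitles = []
--
--     for index, block in enumerate(original_blocks):
--         # 拆分每个字幕块为单独的行
--         lines = block.split('\n')
--         # 仅保留字幕块的序号和时间轴
--         chinese_block = lines[:2]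
--         # 插入翻译后的中文文本
--         if index < len(translated_lines):
--             chinese_block.append(translated_lines[index])
--         # 合并为单个字幕块
--         chinese_subtitles.append('\n'.join(chinese_block))
--
--     # 合并为完整的中文字幕文本
--     return '\n\n'.join(chinese_subtitles)
--
-- def create_bilingual_subtitles(original_text, translated_text, batch_size):
--     # 首先创建中文字幕，这将移除原字幕中所有英文
--     chinese_subtitles = create_chinese_subtitles(original_text, translated_text)
--
--     # 获取全部处理过的英文字幕
--     processed_english_subtitles = get_processed_subtitles(original_text, batch_size)
--
--     # 将中文字幕和处理过的英文字幕分割为块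
--     chinese_blocks = chinese_subtitles.split('\n\n')
--     processed_english_lines = processed_english_subtitles.split('\n')
--
--     bilingual_subtitles = []
--
--     # 遍历每个中文字幕块，并在其下面插入对应的处理过的英文
--     for index, block in enumerate(chinese_blocks):
--         lines = block.split('\n')
--         # 插入翻译后的中文文本
--         if index < len(processed_english_lines):
--             # 确保在时间轴和翻译的中文下方插入英文
--             lines.append(processed_english_lines[index])
--
--         # 合并为单个字幕块
--         bilingual_block = '\n'.join(lines)
--         bilingual_subtitles.append(bilingual_block)
--
--     # 合并为完整的双语字幕文本
--     return '\n\n'.join(bilingual_subtitles)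
-- ===== SOURCE B (Python) =====
-- def create_bilingual_subtitles(original_text, translated_text, batch_size):
--     blocks = original_text.split('\n\n')
--     translated_lines = translated_text.split('\n')
--     chinese = '\n\n'.join(
--         '\n'.join(b.split('\n')[:2] + translated_lines[i:i + 1])
--         for i, b in enumerate(blocks))
--     english_lines = [' '.join(b.split('\n')[2:]).strip() for b in blocks]
--     return '\n\n'.join(
--         '\n'.join([p, english_lines[i]]) if i < len(english_lines) else p
--         for i, p in enumerate(chinese.split('\n\n')))
-- ===== Notes on version B (the rewrite author's own statement) =====
-- stated objective: simpler
-- what changed: B collapses A's three-function pipeline into one function: it drops the batch loop and the English serialize/re-split roundtrip (for a positive batch size batching cannot change the result, so the per-block English lines are computed directly as a flat list) and builds the Chinese text in a single comprehension; only the final split of the Chinese string is kept, since it is semantically load-bearing.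
-- outside the precondition, e.g. on create_bilingual_subtitles('a\nb\nc', 'X', -1): A returns 'a\nb\nX\n', B returns 'a\nb\nX\nc'; on create_bilingual_subtitles('', '', 0): A raises ValueError, B returns '\n\n'
import Mathlib
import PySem

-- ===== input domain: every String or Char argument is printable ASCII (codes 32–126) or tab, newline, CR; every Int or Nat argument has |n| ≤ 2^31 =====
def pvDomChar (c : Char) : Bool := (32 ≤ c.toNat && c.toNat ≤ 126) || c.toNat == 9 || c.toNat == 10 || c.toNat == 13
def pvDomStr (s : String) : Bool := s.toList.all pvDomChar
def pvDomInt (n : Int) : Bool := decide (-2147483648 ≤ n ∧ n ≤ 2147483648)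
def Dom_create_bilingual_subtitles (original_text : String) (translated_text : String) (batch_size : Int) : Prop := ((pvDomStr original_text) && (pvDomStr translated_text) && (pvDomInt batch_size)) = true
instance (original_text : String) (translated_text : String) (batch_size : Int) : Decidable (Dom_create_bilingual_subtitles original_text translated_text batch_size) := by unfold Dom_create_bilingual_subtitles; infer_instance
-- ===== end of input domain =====

-- B simplifies A's three-function pipeline to one pass (no batch loop, no English
-- serialize/re-split); equivalence is proved for batch_size ≥ 1 (Pre_).
-- Both ports work over List Char (PySem.Chars) and wrap to String once at the top.

-- ===== PORT A =====

-- helper: get_processed_subtitles(text, batch_size)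
def pvGetProcessed (text : List Char) (batch_size : Int) : List Char :=
  let subtitle_blocks := PySem.Chars.splitOn text ['\n', '\n']
  let all_processed_texts :=
    (PySem.List.pyRange 0 (PySem.List.len subtitle_blocks) batch_size).foldl
      (fun acc batch_start =>
        let batch_blocks := PySem.List.slice subtitle_blocks (some batch_start) (some (batch_start + batch_size))
        let processed_batch := batch_blocks.foldl
          (fun pb block =>
            let lines := PySem.Chars.splitOn block ['\n']
            let subtitle_text := PySem.Chars.join [' '] (PySem.List.slice lines (some 2) none)
            pb ++ [PySem.Chars.strip subtitle_text]) []
        acc ++ [PySem.Chars.join ['\n'] processed_batch]) []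
  PySem.Chars.join ['\n'] all_processed_texts

-- helper: create_chinese_subtitles(original_text, translated_text)
def pvCreateChinese (original_text : List Char) (translated_text : List Char) : List Char :=
  let original_blocks := PySem.Chars.splitOn original_text ['\n', '\n']
  let translated_lines := PySem.Chars.splitOn translated_text ['\n']
  let chinese_subtitles := (PySem.List.enumerate original_blocks).foldl
    (fun acc p =>
      let lines := PySem.Chars.splitOn p.2 ['\n']
      let chinese_block := PySem.List.slice lines none (some 2)
      let chinese_block :=
        if p.1 < PySem.List.len translated_lines then
          chinese_block ++ [PySem.List.pyGetD translated_lines p.1 []]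
        else chinese_block
      acc ++ [PySem.Chars.join ['\n'] chinese_block]) []
  PySem.Chars.join ['\n', '\n'] chinese_subtitles

def pvBilingualA (original_text : List Char) (translated_text : List Char) (batch_size : Int) : List Char :=
  let chinese_subtitles := pvCreateChinese original_text translated_text
  let processed_english_subtitles := pvGetProcessed original_text batch_size
  let chinese_blocks := PySem.Chars.splitOn chinese_subtitles ['\n', '\n']
  let processed_english_lines := PySem.Chars.splitOn processed_english_subtitles ['\n']
  let bilingual_subtitles := (PySem.List.enumerate chinese_blocks).foldl
    (fun acc p =>
      let lines := PySem.Chars.splitOn p.2 ['\n']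
      let lines :=
        if p.1 < PySem.List.len processed_english_lines then
          lines ++ [PySem.List.pyGetD processed_english_lines p.1 []]
        else lines
      acc ++ [PySem.Chars.join ['\n'] lines]) []
  PySem.Chars.join ['\n', '\n'] bilingual_subtitles

def create_bilingual_subtitles (original_text : String) (translated_text : String) (batch_size : Int) : String :=
  String.ofList (pvBilingualA original_text.toList translated_text.toList batch_size)

-- ===== PORT B =====

-- per-block processed English text: ' '.join(b.split('\n')[2:]).strip()
def pvEnglishOf (b : List Char) : List Char :=
  PySem.Chars.strip (PySem.Chars.join [' '] (PySem.List.slice (PySem.Chars.splitOn b ['\n']) (some 2) none))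

def pvBilingualB (original_text : List Char) (translated_text : List Char) : List Char :=
  let blocks := PySem.Chars.splitOn original_text ['\n', '\n']
  let translated_lines := PySem.Chars.splitOn translated_text ['\n']
  let chinese := PySem.Chars.join ['\n', '\n']
    ((PySem.List.enumerate blocks).map (fun p =>
      PySem.Chars.join ['\n']
        (PySem.List.slice (PySem.Chars.splitOn p.2 ['\n']) none (some 2) ++
         PySem.List.slice translated_lines (some p.1) (some (p.1 + 1)))))
  let english_lines := blocks.map pvEnglishOf
  PySem.Chars.join ['\n', '\n']
    ((PySem.List.enumerate (PySem.Chars.splitOn chinese ['\n', '\n'])).map (fun p =>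
      if p.1 < PySem.List.len english_lines then
        PySem.Chars.join ['\n'] [p.2, PySem.List.pyGetD english_lines p.1 []]
      else p.2))

def create_bilingual_subtitles_alt (original_text : String) (translated_text : String) (batch_size : Int) : String :=
  String.ofList (pvBilingualB original_text.toList translated_text.toList)

-- ===== PRECONDITION & SPEC =====

-- Pre_ excludes batch_size ≤ 0: batch_size == 0 makes A's range() raise ValueError,
-- and a negative batch size lies outside the task's natural domain (A's batch loop then
-- runs zero times, yielding a single accidental empty English line).
def Pre_create_bilingual_subtitles (original_text : String) (translated_text : String) (batch_size : Int) : Prop :=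
  1 ≤ batch_size
instance (original_text : String) (translated_text : String) (batch_size : Int) : Decidable (Pre_create_bilingual_subtitles original_text translated_text batch_size) := by unfold Pre_create_bilingual_subtitles; infer_instance

def pvWitness_create_bilingual_subtitles : String × String × Int :=
  ("1\n00:01\nHello there\n\n2\n00:02\nBye", "ni hao\nzai jian", 2)

def Spec_create_bilingual_subtitles (original_text : String) (translated_text : String) (batch_size : Int) (out : String) : Prop := out = create_bilingual_subtitles_alt original_text translated_text batch_size
instance (original_text : String) (translated_text : String) (batch_size : Int) (out : String) : Decidable (Spec_create_bilingual_subtitles original_text translated_text batch_size out) := by unfold Spec_create_bilingual_subtitles; infer_instance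

-- ===== CLAIM (what is proved, stated in full; the proofs are below) =====
def Claim_equal_create_bilingual_subtitles : Prop := ∀ (original_text : String) (translated_text : String) (batch_size : Int), Dom_create_bilingual_subtitles original_text translated_text batch_size → Pre_create_bilingual_subtitles original_text translated_text batch_size → Spec_create_bilingual_subtitles original_text translated_text batch_size (create_bilingual_subtitles original_text translated_text batch_size)

-- ===== LEMMAS AND PROOFS =====

theorem pv_foldl_append {α β : Type} (f : α → β) : ∀ (l : List α) (init : List β),
    l.foldl (fun acc x => acc ++ [f x]) init = init ++ l.map f := by
  intro l
  induction l with
  | nil => simp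
  | cons x xs ih => intro init; simp [List.foldl_cons, ih]

theorem pv_splitOnP_ne_nil {α : Type} (p : α → Bool) (l : List α) : List.splitOnP p l ≠ [] := by
  induction l with
  | nil => simp [List.splitOnP_nil]
  | cons x xs ih =>
    rw [List.splitOnP_cons]
    split_ifs
    · simp
    · cases h : List.splitOnP p xs with
      | nil => exact absurd h ih
      | cons a as => simp [h, List.modifyHead]

theorem pv_not_mem_splitOnP {α : Type} (p : α → Bool) (l : List α) :
    ∀ q ∈ List.splitOnP p l, ∀ x ∈ q, p x = false := by
  induction l with
  | nil => simp [List.splitOnP_nil]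
  | cons a as ih =>
    rw [List.splitOnP_cons]
    split_ifs with hpa
    · intro q hq
      rcases List.mem_cons.mp hq with hq | hq
      · simp [hq]
      · exact ih q hq
    · intro q hq x hx
      cases h : List.splitOnP p as with
      | nil => exact absurd h (pv_splitOnP_ne_nil p as)
      | cons b bs =>
        rw [h, List.modifyHead] at hq
        rcases List.mem_cons.mp hq with hq | hq
        · subst hq
          rcases List.mem_cons.mp hx with hx | hx
          · simp [hx, hpa]
          · exact ih b (by rw [h]; exact List.mem_cons_self) x hx
        · exact ih q (by rw [h]; exact List.mem_cons_of_mem _ hq) x hx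

theorem pv_not_mem_splitOn (c : Char) (l : List Char) :
    ∀ q ∈ List.splitOn c l, c ∉ q := by
  intro q hq hc
  have := pv_not_mem_splitOnP (· == c) l q (by simpa [List.splitOn] using hq) c hc
  simp at this


theorem pv_go_spec (c : Char) : ∀ (l : List Char) (fuel : Nat) (cur : List Char) (acc : List (List Char)),
    l.length ≤ fuel →
    PySem.Chars.splitOn.go [c] fuel l cur acc =
      acc.reverse ++ (List.splitOn c l).modifyHead (cur.reverse ++ ·) := by
  intro l
  induction l with
  | nil =>
    intro fuel cur acc _
    cases fuel <;> simp [PySem.Chars.splitOn.go, List.splitOn_nil, List.modifyHead]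
  | cons a rest ih =>
    intro fuel cur acc hf
    cases fuel with
    | zero => simp at hf
    | succ f =>
      rw [PySem.Chars.splitOn.go]
      by_cases hca : a = c
      · subst hca
        have hpre : List.isPrefixOf [a] (a :: rest) = true := by simp [List.isPrefixOf]
        rw [if_pos hpre]
        simp only [List.length_cons] at hf
        simp only [List.length_cons, List.length_nil, List.drop_succ_cons, List.drop_zero]
        rw [ih f [] (cur.reverse :: acc) (by omega)]
        simp only [List.splitOn, List.splitOnP_cons, beq_self_eq_true, if_pos, List.modifyHead,
          List.reverse_cons, List.append_assoc, List.nil_append, List.reverse_nil, List.cons_append]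
        simp [List.modifyHead]
        cases List.splitOnP (fun x => x == a) rest <;> rfl
      · have hpre : List.isPrefixOf [c] (a :: rest) = false := by
          simp [List.isPrefixOf]; exact fun h => absurd h.symm hca
        rw [if_neg (by simp [hpre])]
        simp only [List.length_cons] at hf
        rw [ih f (a :: cur) acc (by omega)]
        have : List.splitOn c (a :: rest) = List.modifyHead (List.cons a) (List.splitOn c rest) := by
          simp [List.splitOn, List.splitOnP_cons, hca]
        rw [this]
        cases h : List.splitOn c rest with
        | nil =>
          exfalso
          exact absurd h (by simpa [List.splitOn] using pv_splitOnP_ne_nil (· == c) rest)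
        | cons q qs => simp [List.modifyHead]

theorem pv_splitOn_singleton (c : Char) (s : List Char) :
    PySem.Chars.splitOn s [c] = List.splitOn c s := by
  rw [PySem.Chars.splitOn, pv_go_spec c s (s.length + 1) [] [] (by omega)]
  simp [List.modifyHead]
  cases List.splitOn c s <;> rfl

theorem pv_join_splitOn (c : Char) (s : List Char) :
    PySem.Chars.join [c] (PySem.Chars.splitOn s [c]) = s := by
  rw [pv_splitOn_singleton]
  exact List.intercalate_splitOn s c

theorem pv_splitOn_join (c : Char) (ls : List (List Char)) (h : ∀ l ∈ ls, c ∉ l) (hne : ls ≠ []) :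
    PySem.Chars.splitOn (PySem.Chars.join [c] ls) [c] = ls := by
  rw [pv_splitOn_singleton]
  exact List.splitOn_intercalate ls c h hne

theorem pv_join_cons (c : Char) (a : List Char) (ys : List (List Char)) (hys : ys ≠ []) :
    PySem.Chars.join [c] (a :: ys) = a ++ c :: PySem.Chars.join [c] ys := by
  cases ys with
  | nil => exact absurd rfl hys
  | cons b bs => rw [PySem.Chars.join_cons_cons]; simp

theorem pv_join_append (c : Char) (p ys : List (List Char)) (hp : p ≠ []) (hys : ys ≠ []) :
    PySem.Chars.join [c] (p ++ ys) = PySem.Chars.join [c] p ++ c :: PySem.Chars.join [c] ys := by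
  induction p with
  | nil => exact absurd rfl hp
  | cons a as ih =>
    cases as with
    | nil =>
      simp only [List.cons_append, List.nil_append, PySem.Chars.join_singleton]
      rw [pv_join_cons c a ys hys]
    | cons b bs =>
      have hr := ih (by simp)
      simp only [List.cons_append] at hr ⊢
      rw [pv_join_cons c a (b :: (bs ++ ys)) (by simp), hr,
          pv_join_cons c a (b :: bs) (by simp)]
      simp

theorem pv_join_append_singleton (c : Char) (xs : List (List Char)) (e : List Char)
    (h : xs ≠ []) :
    PySem.Chars.join [c] (xs ++ [e]) = PySem.Chars.join [c] xs ++ c :: e := by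
  rw [pv_join_append c xs [e] h (by simp), PySem.Chars.join_singleton]

theorem pv_mem_join (c : Char) (ls : List (List Char)) (x : Char)
    (hx : x ∈ PySem.Chars.join [c] ls) : x = c ∨ ∃ l ∈ ls, x ∈ l := by
  induction ls with
  | nil => simp [PySem.Chars.join_nil] at hx
  | cons a as ih =>
    cases as with
    | nil => rw [PySem.Chars.join_singleton] at hx; right; exact ⟨a, by simp, hx⟩
    | cons b bs =>
      rw [PySem.Chars.join_cons_cons] at hx
      simp only [List.mem_append] at hx
      rcases hx with (hx | hx) | hx
      · right; exact ⟨a, by simp, hx⟩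
      · left; simpa using hx
      · rcases ih hx with h | ⟨l, hl, hxl⟩
        · left; exact h
        · right; exact ⟨l, by simp [hl], hxl⟩

theorem pv_join_flatten (c : Char) (parts : List (List (List Char)))
    (h : ∀ p ∈ parts, p ≠ []) :
    PySem.Chars.join [c] (parts.map (PySem.Chars.join [c])) = PySem.Chars.join [c] parts.flatten := by
  induction parts with
  | nil => simp [PySem.Chars.join_nil]
  | cons p ps ih =>
    cases ps with
    | nil => simp [PySem.Chars.join_singleton]
    | cons q qs =>
      have hp : p ≠ [] := h p (by simp)
      have hflat : (q :: qs).flatten ≠ [] := by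
        have hq : q ≠ [] := h q (by simp)
        simp only [List.flatten_cons, ne_eq, List.append_eq_nil_iff, not_and]
        intro hqq; exact absurd hqq hq
      rw [List.map_cons, pv_join_cons c _ _ (by simp), ih (fun r hr => h r (by simp [hr]))]
      rw [show (p :: q :: qs).flatten = p ++ (q :: qs).flatten from by simp,
          pv_join_append c p (q :: qs).flatten hp hflat]

theorem pv_strip_subset (x : Char) (s : List Char) (hx : x ∈ PySem.Chars.strip s) : x ∈ s := by
  unfold PySem.Chars.strip PySem.Chars.rstrip PySem.Chars.lstrip at hx
  have h1 := (List.dropWhile_sublist (l := (List.dropWhile PySem.Chars.isspace s).reverse) (p := PySem.Chars.isspace)).subset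
  have h2 := (List.dropWhile_sublist (l := s) (p := PySem.Chars.isspace)).subset
  have := h1 (by simpa using hx)
  simp only [List.mem_reverse] at this
  exact h2 this

-- number of batches, in Nat
theorem pv_batch_count_succ (bN : Nat) (hb : 1 ≤ bN) (n : Nat) (hn : 1 ≤ n) :
    (n + bN - 1) / bN = (n - bN + bN - 1) / bN + 1 := by
  by_cases h : bN ≤ n
  · have : n + bN - 1 = (n - bN + bN - 1) + bN := by omega
    rw [this, Nat.add_div_right _ (by omega)]
  · have h1 : n + bN - 1 = (n - 1) + bN := by omega
    rw [h1, Nat.add_div_right _ (by omega)]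
    have h2 : (n - 1) / bN = 0 := Nat.div_eq_of_lt (by omega)
    have h3 : n - bN = 0 := by omega
    rw [h2, h3]
    simp [Nat.div_eq_of_lt (show bN - 1 < bN by omega)]

theorem pv_chunks {α : Type} (bN : Nat) (hb : 1 ≤ bN) :
    ∀ (xs : List α),
      ((List.range ((xs.length + bN - 1) / bN)).map
        (fun k => (xs.drop (bN * k)).take bN)).flatten = xs ∧
      ∀ ch ∈ (List.range ((xs.length + bN - 1) / bN)).map
        (fun k => (xs.drop (bN * k)).take bN), ch ≠ [] := by
  intro xs
  induction hlen : xs.length using Nat.strong_induction_on generalizing xs with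
  | _ n ih =>
    cases hx : xs with
    | nil =>
      subst hx
      simp at hlen
      subst hlen
      have : (0 + bN - 1) / bN = 0 := Nat.div_eq_of_lt (by omega)
      simp [this]
    | cons a rest =>
      subst hx
      have hn1 : 1 ≤ n := by simp at hlen; omega
      rw [pv_batch_count_succ bN hb n hn1, List.range_succ_eq_map]
      set xs := a :: rest with hxs
      have hdroplen : (xs.drop bN).length = n - bN := by simp [hlen]
      have ihd := ih (n - bN) (by omega) (xs.drop bN) hdroplen
      constructor
      · simp only [List.map_cons, List.map_map, List.flatten_cons, Nat.mul_zero, List.drop_zero]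
        have hmapeq :
            (List.map ((fun k => (xs.drop (bN * k)).take bN) ∘ Nat.succ)
              (List.range ((n - bN + bN - 1) / bN))) =
            (List.map (fun k => ((xs.drop bN).drop (bN * k)).take bN)
              (List.range ((n - bN + bN - 1) / bN))) := by
          apply List.map_congr_left
          intro k _
          simp only [Function.comp]
          rw [List.drop_drop]
          have hm : bN * Nat.succ k = bN + bN * k := by rw [Nat.mul_succ]; exact Nat.add_comm _ _
          rw [hm]
        rw [hmapeq, ihd.1]
        exact List.take_append_drop bN xs
      · intro ch hch
        simp only [List.map_cons, List.mem_cons] at hch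
        rcases hch with hch | hch
        · subst hch
          simp only [Nat.mul_zero, List.drop_zero]
          intro hempty
          have := congrArg List.length hempty
          simp [hlen] at this
          omega
        · simp only [List.map_map] at hch
          obtain ⟨k, hk, hcheq⟩ := List.mem_map.mp hch
          refine ihd.2 ch ?_
          apply List.mem_map.mpr
          refine ⟨k, hk, ?_⟩
          rw [← hcheq]
          simp only [Function.comp]
          rw [List.drop_drop]
          have hm : bN * Nat.succ k = bN + bN * k := by rw [Nat.mul_succ]; exact Nat.add_comm _ _
          rw [hm]

theorem pv_go_ne_nil (sep : List Char) : ∀ (fuel : Nat) (l cur : List Char) (acc : List (List Char)),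
    PySem.Chars.splitOn.go sep fuel l cur acc ≠ [] := by
  intro fuel
  induction fuel with
  | zero => intro l cur acc; rw [PySem.Chars.splitOn.go]; simp
  | succ f ih =>
    intro l cur acc
    cases l with
    | nil => rw [PySem.Chars.splitOn.go]; simp; omega
    | cons a rest =>
      rw [PySem.Chars.splitOn.go]
      split_ifs
      · exact ih _ _ _
      · exact ih _ _ _

theorem pv_splitOn_ne_nil' (s sep : List Char) : PySem.Chars.splitOn s sep ≠ [] :=
  pv_go_ne_nil sep _ s [] []

theorem pv_nl_not_mem_english (b : List Char) : '\n' ∉ pvEnglishOf b := by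
  intro hmem
  have h1 := pv_strip_subset _ _ hmem
  rcases pv_mem_join ' ' _ _ h1 with h | ⟨l, hl, hxl⟩
  · simp at h
  · have hl' : l ∈ PySem.Chars.splitOn b ['\n'] := by
      have := PySem.List.slice_from (PySem.Chars.splitOn b ['\n']) (a := 2) (by omega)
      rw [this] at hl
      exact (List.drop_sublist _ _).subset hl
    rw [pv_splitOn_singleton] at hl'
    exact pv_not_mem_splitOn '\n' b l hl' hxl

theorem pv_pyRange_batches (n : Nat) (bs : Int) (hbs : 1 ≤ bs) :
    PySem.List.pyRange 0 (n : Int) bs =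
      (List.range ((n + bs.toNat - 1) / bs.toNat)).map (fun k => ((bs.toNat * k : Nat) : Int)) := by
  lift bs to Nat using (by omega) with bN
  have hb1 : 1 ≤ bN := by exact_mod_cast hbs
  rw [PySem.List.pyRange_of_pos _ _ (by exact_mod_cast hb1)]
  rw [Int.toNat_natCast]
  rcases Nat.eq_zero_or_pos n with hn | hn
  · subst hn
    have h1 : ¬ ((0:Int) < ((0:Nat):Int)) := by simp
    rw [if_neg h1]
    have h2 : (0 + bN - 1) / bN = 0 := Nat.div_eq_of_lt (by omega)
    simp [h2]
    omega
  · have h1 : (0:Int) < (n:Int) := by exact_mod_cast hn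
    rw [if_pos h1]
    have h2 : ((n:Int) - 0 + (bN:Int) - 1) / (bN:Int) = (((n + bN - 1) / bN : Nat) : Int) := by
      have : (n:Int) - 0 + (bN:Int) - 1 = ((n + bN - 1 : Nat) : Int) := by push_cast; omega
      rw [this]
      norm_cast
    rw [h2, Int.toNat_natCast]
    apply List.map_congr_left
    intro k _
    push_cast
    ring

theorem pv_eng (o : List Char) (bs : Int) (hbs : 1 ≤ bs) :
    PySem.Chars.splitOn (pvGetProcessed o bs) ['\n'] =
      (PySem.Chars.splitOn o ['\n', '\n']).map pvEnglishOf := by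
  unfold pvGetProcessed
  simp only []
  set blocks := PySem.Chars.splitOn o ['\n', '\n'] with hblocks
  set bN := bs.toNat with hbN
  have hb1 : 1 ≤ bN := by omega
  have hbcast : (bN : Int) = bs := Int.toNat_of_nonneg (by omega)
  -- inner folds become maps
  have hinner : ∀ (batch : List (List Char)),
      batch.foldl (fun pb block =>
        pb ++ [PySem.Chars.strip (PySem.Chars.join [' ']
          (PySem.List.slice (PySem.Chars.splitOn block ['\n']) (some 2) none))]) [] =
      batch.map pvEnglishOf := by
    intro batch
    exact pv_foldl_append pvEnglishOf batch []
  -- outer fold becomes a map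
  rw [pv_foldl_append (fun batch_start =>
        PySem.Chars.join ['\n']
          ((PySem.List.slice blocks (some batch_start) (some (batch_start + bs))).foldl
            (fun pb block =>
              pb ++ [PySem.Chars.strip (PySem.Chars.join [' ']
                (PySem.List.slice (PySem.Chars.splitOn block ['\n']) (some 2) none))]) []))]
  simp only [List.nil_append]
  -- normalise the range and the slices
  have hlen : PySem.List.len blocks = ((blocks.length : Nat) : Int) := rfl
  rw [hlen, pv_pyRange_batches blocks.length bs hbs, ← hbN, List.map_map]
  have hslice : ∀ k : Nat,
      PySem.List.slice blocks (some ((bN * k : Nat) : Int)) (some (((bN * k : Nat) : Int) + bs)) =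
        (blocks.drop (bN * k)).take bN := by
    intro k
    rw [← hbcast, PySem.List.slice_natCast_add]
  have hmap1 :
      (List.map ((fun batch_start =>
        PySem.Chars.join ['\n']
          ((PySem.List.slice blocks (some batch_start) (some (batch_start + bs))).foldl
            (fun pb block =>
              pb ++ [PySem.Chars.strip (PySem.Chars.join [' ']
                (PySem.List.slice (PySem.Chars.splitOn block ['\n']) (some 2) none))]) []))
        ∘ (fun k : Nat => ((bN * k : Nat) : Int)))
        (List.range ((blocks.length + bN - 1) / bN))) =
      (List.range ((blocks.length + bN - 1) / bN)).map
        (fun k => PySem.Chars.join ['\n'] (((blocks.drop (bN * k)).take bN).map pvEnglishOf)) := by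
    apply List.map_congr_left
    intro k _
    simp only [Function.comp]
    rw [hslice k, hinner]
  rw [hmap1]
  -- chunks facts
  have hch := pv_chunks bN hb1 blocks
  -- rewrite as join of joins
  have hparts :
      (List.range ((blocks.length + bN - 1) / bN)).map
        (fun k => PySem.Chars.join ['\n'] (((blocks.drop (bN * k)).take bN).map pvEnglishOf)) =
      ((List.range ((blocks.length + bN - 1) / bN)).map
        (fun k => ((blocks.drop (bN * k)).take bN).map pvEnglishOf)).map (PySem.Chars.join ['\n']) := by
    rw [List.map_map]
    rfl
  rw [hparts, pv_join_flatten '\n' _ ?hne]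
  case hne =>
    intro p hp
    obtain ⟨k, hk, hpeq⟩ := List.mem_map.mp hp
    have := hch.2 ((blocks.drop (bN * k)).take bN) (List.mem_map.mpr ⟨k, hk, rfl⟩)
    intro hnil
    rw [← hpeq] at hnil
    exact this (List.map_eq_nil_iff.mp hnil)
  have hflat :
      ((List.range ((blocks.length + bN - 1) / bN)).map
        (fun k => ((blocks.drop (bN * k)).take bN).map pvEnglishOf)).flatten =
      blocks.map pvEnglishOf := by
    have : (List.range ((blocks.length + bN - 1) / bN)).map
        (fun k => ((blocks.drop (bN * k)).take bN).map pvEnglishOf) =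
      ((List.range ((blocks.length + bN - 1) / bN)).map
        (fun k => (blocks.drop (bN * k)).take bN)).map (List.map pvEnglishOf) := by
      rw [List.map_map]
      rfl
    rw [this, ← List.map_flatten, hch.1]
  rw [hflat]
  apply pv_splitOn_join
  · intro l hl
    obtain ⟨b, _, hbeq⟩ := List.mem_map.mp hl
    rw [← hbeq]
    exact pv_nl_not_mem_english b
  · intro hnil
    exact pv_splitOn_ne_nil' o ['\n', '\n'] (List.map_eq_nil_iff.mp hnil)

theorem pv_take_one_drop {α : Type} (tl : List α) (k : Nat) (d : α) :
    (tl.drop k).take 1 = (if (k : Int) < (tl.length : Int) then [PySem.List.pyGetD tl (k : Int) d] else []) := by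
  split_ifs with h
  · have hk : k < tl.length := by exact_mod_cast h
    rw [PySem.List.pyGetD_natCast, List.getD_eq_getElem tl d hk, List.drop_eq_getElem_cons hk]
    rfl
  · have hk : tl.length ≤ k := by omega
    rw [List.drop_of_length_le hk]
    rfl

theorem pv_chinese (o t : List Char) :
    pvCreateChinese o t =
      PySem.Chars.join ['\n', '\n']
        ((PySem.List.enumerate (PySem.Chars.splitOn o ['\n', '\n'])).map (fun p =>
          PySem.Chars.join ['\n']
            (PySem.List.slice (PySem.Chars.splitOn p.2 ['\n']) none (some 2) ++
             PySem.List.slice (PySem.Chars.splitOn t ['\n']) (some p.1) (some (p.1 + 1))))) := by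
  unfold pvCreateChinese
  simp only []
  set blocks := PySem.Chars.splitOn o ['\n', '\n'] with hblocks
  set tl := PySem.Chars.splitOn t ['\n'] with htl
  rw [pv_foldl_append (fun p : Int × List Char =>
        PySem.Chars.join ['\n']
          (if p.1 < PySem.List.len tl then
            PySem.List.slice (PySem.Chars.splitOn p.2 ['\n']) none (some 2) ++ [PySem.List.pyGetD tl p.1 []]
          else PySem.List.slice (PySem.Chars.splitOn p.2 ['\n']) none (some 2)))]
  simp only [List.nil_append]
  apply congrArg
  apply List.map_congr_left
  intro p hp
  obtain ⟨k, hk, hpeq⟩ := (PySem.List.mem_enumerate_iff blocks 0 p).mp hp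
  subst hpeq
  simp only [Int.zero_add]
  congr 1
  have hone : ((k : Int) + 1) = ((k : Int) + ((1 : Nat) : Int)) := by norm_cast
  rw [hone, PySem.List.slice_natCast_add tl k 1, pv_take_one_drop tl k []]
  have hlen : PySem.List.len tl = ((tl.length : Nat) : Int) := rfl
  rw [hlen]
  split_ifs <;> simp

theorem pv_main (o t : List Char) (bs : Int) (hbs : 1 ≤ bs) :
    pvBilingualA o t bs = pvBilingualB o t := by
  unfold pvBilingualA pvBilingualB
  simp only []
  rw [pv_chinese o t, pv_eng o bs hbs]
  set blocks := PySem.Chars.splitOn o ['\n', '\n'] with hblocks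
  set chinese := PySem.Chars.join ['\n', '\n']
    ((PySem.List.enumerate blocks).map (fun p =>
      PySem.Chars.join ['\n']
        (PySem.List.slice (PySem.Chars.splitOn p.2 ['\n']) none (some 2) ++
         PySem.List.slice (PySem.Chars.splitOn t ['\n']) (some p.1) (some (p.1 + 1))))) with hchinese
  set elines := blocks.map pvEnglishOf with helines
  rw [pv_foldl_append (fun p : Int × List Char =>
        PySem.Chars.join ['\n']
          (if p.1 < PySem.List.len elines then
            PySem.Chars.splitOn p.2 ['\n'] ++ [PySem.List.pyGetD elines p.1 []]
          else PySem.Chars.splitOn p.2 ['\n']))]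
  simp only [List.nil_append]
  apply congrArg
  apply List.map_congr_left
  intro p _
  split_ifs with h
  · rw [pv_join_append_singleton '\n' _ _ (pv_splitOn_ne_nil' p.2 ['\n']), pv_join_splitOn '\n']
    rw [PySem.Chars.join_cons_cons, PySem.Chars.join_singleton]
    simp
  · exact pv_join_splitOn '\n' p.2

-- ===== VERDICT (by name: the statement is the Claim_ definition above) =====
theorem create_bilingual_subtitles_spec : Claim_equal_create_bilingual_subtitles := by
  intro o t bs _ hpre
  unfold Spec_create_bilingual_subtitles create_bilingual_subtitles create_bilingual_subtitles_alt
  rw [pv_main _ _ _ hpre]
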